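-- pv_equiv track=rewrite | github.com/kate1503/HW_DQEPython | hw_2/hw_2.py | common_dict
-- ===== SOURCE A (Python) =====
-- from collections import defaultdict
--
-- def common_dict(list_of_dicts):
--     merged_dict = defaultdict(list)
--
--     # Collect all unique keys and their values in merged_dict
--     for num_dict, dictionary in enumerate(list_of_dicts):
--         for key, value in dictionary.items():
--             # Adding a tuple (dictionary_number, value) to the list corresponding
--             # to the current key in the merged_dict
--             merged_dict[key].append((num_dict, value))
--     result_dict = {}
--     for key, values in merged_dict.items():
--         # Check if the current key is unique (it is unique if there is only one tuple in list)
--         if len(values) == 1: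
--             result_dict[key] = values[0][1]
--         else:
--             # Find the tuple with max value for the current key
--             max_value = max(values, key=lambda x: x[1])
--             # Rename key and set max value
--             result_dict[f'{key}_{max_value[0]}'] = max_value[1]
--     return result_dict
-- ===== SOURCE B (Python) =====
-- def common_dict(list_of_dicts):
--     # One pass: key -> (count, best_value, best_index), running strict max
--     # (strict '>' keeps the first maximum, like Python's max()).
--     agg = {}
--     for i, d in enumerate(list_of_dicts):
--         for k, v in d.items():
--             c, best, bi = agg.get(k, (0, None, -1))
--             if c == 0 or v > best:
--                 best, bi = v, i
--             agg[k] = (c + 1, best, bi)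
--     result = {}
--     for k, (c, best, bi) in agg.items():
--         if c == 1:
--             result[k] = best
--         else:
--             result[f'{k}_{bi}'] = best
--     return result
-- ===== Notes on version B (the rewrite author's own statement) =====
-- stated objective: alternative
-- what changed: Replaces A's per-key list accumulation followed by a second max()-reduction pass with a single pass that maintains (count, running best value, best index) per key, updating only on strict '>' so the first maximum wins as in max(); the final pass just reads the aggregate.
import Mathlib
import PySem

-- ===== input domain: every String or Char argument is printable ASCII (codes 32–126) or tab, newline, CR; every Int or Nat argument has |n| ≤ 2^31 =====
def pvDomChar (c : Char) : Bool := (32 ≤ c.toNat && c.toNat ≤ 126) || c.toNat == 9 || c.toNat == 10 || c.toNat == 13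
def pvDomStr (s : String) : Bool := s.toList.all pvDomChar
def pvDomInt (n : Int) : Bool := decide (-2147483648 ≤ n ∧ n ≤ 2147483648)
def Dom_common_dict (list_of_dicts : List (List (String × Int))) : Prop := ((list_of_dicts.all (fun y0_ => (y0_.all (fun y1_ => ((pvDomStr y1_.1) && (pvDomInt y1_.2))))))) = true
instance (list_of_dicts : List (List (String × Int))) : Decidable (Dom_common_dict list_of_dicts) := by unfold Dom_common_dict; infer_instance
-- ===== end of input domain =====

-- B replaces A's per-key list accumulation + second max()-reduction by a single pass keeping
-- (count, running best value, best index) per key (strict '>' so the first maximum wins, as max() does).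


-- shared helper: the f-string  f'{key}_{idx}'  both Pythons format
def pvRename (k : String) (i : Int) : String := String.ofList (k.toList ++ '_' :: PySem.Int.toChars i)

-- ===== PORT A =====
def common_dict (list_of_dicts : List (List (String × Int))) : List (String × Int) :=
  -- merged_dict : key -> list of (dict index, value), built by the nested append loop
  let merged : PySem.Dict String (List (Int × Int)) :=
    (PySem.List.enumerate list_of_dicts).foldl
      (fun merged p =>
        (PySem.Dict.ofList p.2).items.foldl
          (fun merged q => merged.modify q.1 [] (fun l => l ++ [(p.1, q.2)])) merged)
      PySem.Dict.empty
  let result : PySem.Dict String Int :=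
    merged.items.foldl
      (fun res kv =>
        if kv.2.length == 1 then
          res.insert kv.1 (PySem.List.pyGetD kv.2 0 (0, 0)).2
        else
          match PySem.List.max? kv.2 (fun x => x.2) with
          | some m => res.insert (pvRename kv.1 m.1) m.2
          | none => res)  -- totality guard only: values is never [] here (Python max would raise)
      PySem.Dict.empty
  result.items

-- ===== PORT B =====
def common_dict_alt (list_of_dicts : List (List (String × Int))) : List (String × Int) :=
  -- one pass: key -> (count, best value, best index), running strict max
  let agg : PySem.Dict String (Int × Int × Int) :=
    (PySem.List.enumerate list_of_dicts).foldl
      (fun agg p =>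
        (PySem.Dict.ofList p.2).items.foldl
          (fun agg q =>
            agg.modify q.1 (0, 0, -1) (fun t =>
              if t.1 == 0 || decide (t.2.1 < q.2) then (t.1 + 1, q.2, p.1)
              else (t.1 + 1, t.2.1, t.2.2)))
          agg)
      PySem.Dict.empty
  let result : PySem.Dict String Int :=
    agg.items.foldl
      (fun res kv =>
        if kv.2.1 == 1 then res.insert kv.1 kv.2.2.1
        else res.insert (pvRename kv.1 kv.2.2.2) kv.2.2.1)
      PySem.Dict.empty
  result.items

-- ===== PRECONDITION & SPEC =====
def Spec_common_dict (list_of_dicts : List (List (String × Int))) (out : List (String × Int)) : Prop := out = common_dict_alt list_of_dicts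
instance (list_of_dicts : List (List (String × Int))) (out : List (String × Int)) : Decidable (Spec_common_dict list_of_dicts out) := by unfold Spec_common_dict; infer_instance

-- ===== CLAIM (what is proved, stated in full; the proofs are below) =====
def Claim_equal_common_dict : Prop := ∀ (list_of_dicts : List (List (String × Int))), Dom_common_dict list_of_dicts → Spec_common_dict list_of_dicts (common_dict list_of_dicts)

-- ===== LEMMAS AND PROOFS =====

-- the stream of (key, (dict index, value)) triples both nested loops traverse, flattened
def pvPairs (L : List (List (String × Int))) : List (String × Int × Int) :=
  (PySem.List.enumerate L).flatMap
    (fun p => (PySem.Dict.ofList p.2).items.map (fun q => (q.1, p.1, q.2)))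

-- B's per-entry update of the (count, best value, best index) triple, on flattened entries
def pvStepAgg (t : Int × Int × Int) (a : Int × Int) : Int × Int × Int :=
  if t.1 == 0 || decide (t.2.1 < a.2) then (t.1 + 1, a.2, a.1) else (t.1 + 1, t.2.1, t.2.2)

-- the running-max step hidden inside PySem.List.max?
def pvStepMax (m a : Int × Int) : Int × Int := if m.2 < a.2 then a else m

lemma pv_mergedA_eq (L : List (List (String × Int))) :
    (PySem.List.enumerate L).foldl
      (fun merged p =>
        (PySem.Dict.ofList p.2).items.foldl
          (fun merged q => merged.modify q.1 [] (fun l => l ++ [(p.1, q.2)])) merged)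
      (PySem.Dict.empty : PySem.Dict String (List (Int × Int)))
    = (pvPairs L).foldl (fun d a => d.modify a.1 [] (fun l => l ++ [a.2])) PySem.Dict.empty := by
  simp [pvPairs, List.foldl_flatMap, List.foldl_map]

lemma pv_aggB_eq (L : List (List (String × Int))) :
    (PySem.List.enumerate L).foldl
      (fun agg p =>
        (PySem.Dict.ofList p.2).items.foldl
          (fun agg q =>
            agg.modify q.1 (0, 0, -1) (fun t =>
              if t.1 == 0 || decide (t.2.1 < q.2) then (t.1 + 1, q.2, p.1)
              else (t.1 + 1, t.2.1, t.2.2)))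
          agg)
      (PySem.Dict.empty : PySem.Dict String (Int × Int × Int))
    = (pvPairs L).foldl (fun d a => d.modify a.1 (0, 0, -1) (fun t => pvStepAgg t a.2)) PySem.Dict.empty := by
  simp [pvPairs, List.foldl_flatMap, List.foldl_map, pvStepAgg]

-- getD through a generic modify loop = fold over the entries of that key
lemma pv_getD_foldl_modify {ν : Type} (f : ν → Int × Int → ν) (d0 : ν)
    (l : List (String × Int × Int)) (d : PySem.Dict String ν) (k : String) :
    (l.foldl (fun d a => d.modify a.1 d0 (fun v => f v a.2)) d).getD k d0
    = ((l.filter (fun a => a.1 == k)).map (fun a => a.2)).foldl f (d.getD k d0) := by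
  induction l generalizing d with
  | nil => rfl
  | cons a l ih =>
    simp only [List.foldl_cons, List.filter_cons]
    rw [ih, PySem.Dict.getD_modify]
    by_cases h : a.1 = k
    · simp [h]
    · have hb : (a.1 == k) = false := by simp [h]
      rw [if_neg (fun hh => h hh.symm)]
      simp [hb]

lemma pv_max?_cons (x : Int × Int) (t : List (Int × Int)) :
    PySem.List.max? (x :: t) (fun y => y.2) = some (t.foldl pvStepMax x) := by
  induction t generalizing x with
  | nil => rfl
  | cons y t ih =>
    have hstep : PySem.List.max? (x :: y :: t) (fun p => p.2)
        = PySem.List.max? (pvStepMax x y :: t) (fun p => p.2) := by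
      by_cases h : x.2 < y.2 <;> simp [PySem.List.max?, pvStepMax, h]
    rw [hstep, ih]
    rfl

lemma pv_agg_foldl (t : List (Int × Int)) (c b bi : Int) (hc : 0 < c) :
    t.foldl pvStepAgg (c, b, bi)
    = (c + (t.length : Int), (t.foldl pvStepMax (bi, b)).2, (t.foldl pvStepMax (bi, b)).1) := by
  induction t generalizing c b bi with
  | nil => simp
  | cons x t ih =>
    have hc0 : (c == 0) = false := by simp; omega
    by_cases h : b < x.2
    · have hstep : pvStepAgg (c, b, bi) x = (c + 1, x.2, x.1) := by simp [pvStepAgg, hc0, h]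
      have hmax : pvStepMax (bi, b) x = x := by simp [pvStepMax, h]
      rw [List.foldl_cons, List.foldl_cons, hstep, hmax, ih (c + 1) x.2 x.1 (by omega), Prod.mk.eta]
      simp only [List.length_cons, Nat.cast_add, Nat.cast_one]
      congr 1
      ring
    · have hstep : pvStepAgg (c, b, bi) x = (c + 1, b, bi) := by simp [pvStepAgg, hc0, h]
      have hmax : pvStepMax (bi, b) x = (bi, b) := by simp [pvStepMax, h]
      rw [List.foldl_cons, List.foldl_cons, hstep, hmax, ih (c + 1) b bi (by omega)]
      simp only [List.length_cons, Nat.cast_add, Nat.cast_one]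
      congr 1
      ring

lemma pv_agg_from_zero (x : Int × Int) (t : List (Int × Int)) :
    (x :: t).foldl pvStepAgg (0, 0, -1)
    = (1 + (t.length : Int), (t.foldl pvStepMax x).2, (t.foldl pvStepMax x).1) := by
  have h0 : pvStepAgg (0, 0, -1) x = (1, x.2, x.1) := by simp [pvStepAgg]
  simp only [List.foldl_cons, h0]
  have := pv_agg_foldl t 1 x.2 x.1 (by omega)
  simpa using this

-- ===== VERDICT (by name: the statement is the Claim_ definition above) =====
theorem common_dict_spec : Claim_equal_common_dict := by
  intro L _
  unfold Spec_common_dict common_dict common_dict_alt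
  dsimp only
  rw [pv_mergedA_eq, pv_aggB_eq]
  set P := pvPairs L with hP
  set merged := P.foldl (fun d a => d.modify a.1 [] (fun l => l ++ [a.2]))
      (PySem.Dict.empty : PySem.Dict String (List (Int × Int))) with hm
  set agg := P.foldl (fun d a => d.modify a.1 (0, 0, -1) (fun t => pvStepAgg t a.2))
      (PySem.Dict.empty : PySem.Dict String (Int × Int × Int)) with ha
  have hkm : merged.keys = PySem.Set.ofList (P.map (fun a => a.1)) := by
    rw [hm, PySem.Dict.keys_foldl_modify_key P (fun a => a.1) [] (fun _ a => fun l => l ++ [a.2])]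
    simp [PySem.Set.update_nil_left]
  have hka : agg.keys = PySem.Set.ofList (P.map (fun a => a.1)) := by
    rw [ha, PySem.Dict.keys_foldl_modify_key P (fun a => a.1) (0, 0, -1) (fun _ a => fun t => pvStepAgg t a.2)]
    simp [PySem.Set.update_nil_left]
  have hnm : merged.keys.Nodup := by
    rw [hm]; exact PySem.Dict.nodup_keys_foldl_modify_key _ _ _ _ _ (by simp)
  have hna : agg.keys.Nodup := by
    rw [ha]; exact PySem.Dict.nodup_keys_foldl_modify_key _ _ _ _ _ (by simp)
  rw [PySem.Dict.items_eq_map_keys merged hnm [], PySem.Dict.items_eq_map_keys agg hna (0, 0, -1),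
      hkm, hka, List.foldl_map, List.foldl_map]
  congr 1
  apply PySem.List.foldl_congr_mem
  intro res k hk
  have hkmem : k ∈ P.map (fun a => a.1) := (PySem.Set.mem_ofList _ k).mp hk
  -- the per-key entry list is nonempty
  have hvs : ∃ x t, (P.filter (fun a => a.1 == k)).map (fun a => a.2) = x :: t := by
    obtain ⟨a, haP, hak⟩ := List.mem_map.mp hkmem
    have hmem : a ∈ P.filter (fun a => a.1 == k) := List.mem_filter.mpr ⟨haP, by simp [hak]⟩
    cases hfl : (P.filter (fun a => a.1 == k)).map (fun a => a.2) with
    | nil =>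
      have hmm : a.2 ∈ (P.filter (fun a => a.1 == k)).map (fun a => a.2) :=
        List.mem_map_of_mem hmem
      rw [hfl] at hmm
      exact absurd hmm (List.not_mem_nil)
    | cons x t => exact ⟨x, t, rfl⟩
  obtain ⟨x, t, hxt⟩ := hvs
  have hgm : merged.getD k [] = x :: t := by
    rw [hm, PySem.Dict.getD_foldl_modify_append]
    simpa using hxt
  have hga : agg.getD k (0, 0, -1)
      = (1 + (t.length : Int), (t.foldl pvStepMax x).2, (t.foldl pvStepMax x).1) := by
    rw [ha, pv_getD_foldl_modify pvStepAgg (0, 0, -1) P PySem.Dict.empty k]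
    rw [PySem.Dict.getD_empty, hxt, pv_agg_from_zero]
  simp only [hgm, hga]
  by_cases ht : t = []
  · subst ht
    simp [PySem.List.pyGetD, PySem.List.pyGet?, PySem.List.pyIdx?]
  · have hlen0 : t.length ≠ 0 := by simpa [List.length_eq_zero_iff] using ht
    have hlen : ((x :: t).length == 1) = false := by
      simp only [List.length_cons, beq_eq_false_iff_ne, ne_eq]
      omega
    have hc : ((1 + (t.length : Int)) == 1) = false := by
      simp only [beq_eq_false_iff_ne, ne_eq]
      omega
    simp only [hlen, hc, Bool.false_eq_true, if_false, pv_max?_cons]
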